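-- pv_equiv track=rewrite | github.com/pypi-data/pypi-mirror-403 | packages/wafer-lsp/wafer_lsp-0.1.26.tar.gz/wafer_lsp-0.1.26/src/wafer_lsp/parsers/hip_parser.py | is_hip_file
-- ===== SOURCE A (Python) =====
-- def is_hip_file(content: str) -> bool:
--     """Check if content appears to be a HIP file based on content markers."""
--     hip_markers = [
--         '#include <hip/hip_runtime.h>',
--         '#include "hip/hip_runtime.h"',
--         '#include <hip/hip_runtime_api.h>',
--         'hipMalloc',
--         'hipMemcpy',
--         'hipFree',
--         'hipLaunchKernelGGL',
--         'hipDeviceSynchronize',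
--         '__HIP_PLATFORM_AMD__',
--         '__HIP_PLATFORM_HCC__',
--         'HIP_KERNEL_NAME',
--     ]
--
--     content_lower = content.lower()
--     for marker in hip_markers:
--         if marker.lower() in content_lower:
--             return True
--
--     return False
-- ===== SOURCE B (Python) =====
-- # Every HIP marker contains the substring 'hip' (case-insensitively), so instead of
-- # scanning the whole content once per marker we jump between 'hip' occurrences with
-- # str.find and check, at each anchor, whether some marker is aligned there.
-- _ANCHORED_MARKERS = [
--     (m, m.index('hip'))
--     for m in (
--         '#include <hip/hip_runtime.h>',
--         '#include "hip/hip_runtime.h"',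
--         '#include <hip/hip_runtime_api.h>',
--         'hipmalloc',
--         'hipmemcpy',
--         'hipfree',
--         'hiplaunchkernelggl',
--         'hipdevicesynchronize',
--         '__hip_platform_amd__',
--         '__hip_platform_hcc__',
--         'hip_kernel_name',
--     )
-- ]
--
--
-- def is_hip_file(content: str) -> bool:
--     """Check if content appears to be a HIP file based on content markers."""
--     cl = content.lower()
--     i = cl.find('hip')
--     while i != -1:
--         for marker, off in _ANCHORED_MARKERS:
--             start = i - off
--             if start >= 0 and cl.startswith(marker, start):
--                 return True
--         i = cl.find('hip', i + 1)
--     return False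
-- ===== Notes on version B (the rewrite author's own statement) =====
-- stated objective: alternative
-- what changed: Instead of scanning the whole content once per marker, B exploits that every marker contains 'hip': it jumps between 'hip' occurrences with str.find and at each anchor checks whether some pre-lowered marker is aligned there at its recorded offset.
import Mathlib
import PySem

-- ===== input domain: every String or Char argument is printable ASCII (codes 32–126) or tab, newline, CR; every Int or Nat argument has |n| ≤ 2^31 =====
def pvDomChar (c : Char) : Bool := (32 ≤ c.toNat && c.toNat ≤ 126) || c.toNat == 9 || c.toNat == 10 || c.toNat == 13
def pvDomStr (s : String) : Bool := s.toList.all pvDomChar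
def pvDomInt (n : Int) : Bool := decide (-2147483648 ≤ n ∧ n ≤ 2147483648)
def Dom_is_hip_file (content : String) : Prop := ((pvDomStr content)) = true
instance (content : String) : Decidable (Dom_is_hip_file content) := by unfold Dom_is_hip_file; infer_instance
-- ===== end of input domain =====

-- B replaces A's marker-major loop of whole-content substring scans by a find-driven scan
-- anchored on occurrences of 'hip' (every marker contains it), checking aligned markers there.

-- ===== PORT A =====
def hipMarkers : List String := [
  "#include <hip/hip_runtime.h>",
  "#include \"hip/hip_runtime.h\"",
  "#include <hip/hip_runtime_api.h>",
  "hipMalloc",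
  "hipMemcpy",
  "hipFree",
  "hipLaunchKernelGGL",
  "hipDeviceSynchronize",
  "__HIP_PLATFORM_AMD__",
  "__HIP_PLATFORM_HCC__",
  "HIP_KERNEL_NAME"]

-- for-loop with early 'return True' = List.any over the markers
def is_hip_file (content : String) : Bool :=
  let contentLower := PySem.Str.lower content
  hipMarkers.any (fun marker => PySem.Str.isIn (PySem.Str.lower marker) contentLower)

-- ===== PORT B =====
-- Source B's _ANCHORED_MARKERS: each lowered marker paired with m.index('hip'), evaluated
-- at module load; the pairs are the literals that comprehension produces.
def anchoredMarkers : List (String × Nat) := [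
  ("#include <hip/hip_runtime.h>", 10),
  ("#include \"hip/hip_runtime.h\"", 10),
  ("#include <hip/hip_runtime_api.h>", 10),
  ("hipmalloc", 0),
  ("hipmemcpy", 0),
  ("hipfree", 0),
  ("hiplaunchkernelggl", 0),
  ("hipdevicesynchronize", 0),
  ("__hip_platform_amd__", 2),
  ("__hip_platform_hcc__", 2),
  ("hip_kernel_name", 0)]

-- inner for-loop of Source B: at anchor i, does some marker start at i - off (with i - off ≥ 0)?
def tryAnchors (cl : List Char) (i : Nat) : Bool :=
  anchoredMarkers.any (fun p => decide (p.2 ≤ i) && PySem.Chars.startswith (cl.drop (i - p.2)) p.1.toList)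

-- Source B's while loop over cl.find('hip', ·): visit the 'hip' occurrences at positions ≥ i
-- in increasing order (find's semantics spelled out step by step), test the anchor at each.
def scanHip (cl : List Char) (i : Nat) : Bool :=
  if cl.length ≤ i then false
  else if PySem.Chars.startswith (cl.drop i) ['h', 'i', 'p'] then
    if tryAnchors cl i then true else scanHip cl (i + 1)
  else scanHip cl (i + 1)
termination_by cl.length - i
decreasing_by all_goals omega

def is_hip_file_alt (content : String) : Bool :=
  scanHip (PySem.Str.lower content).toList 0

-- ===== PRECONDITION & SPEC =====
def Spec_is_hip_file (content : String) (out : Bool) : Prop := out = is_hip_file_alt content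
instance (content : String) (out : Bool) : Decidable (Spec_is_hip_file content out) := by unfold Spec_is_hip_file; infer_instance

-- ===== CLAIM (what is proved, stated in full; the proofs are below) =====
def Claim_equal_is_hip_file : Prop := ∀ (content : String), Dom_is_hip_file content → Spec_is_hip_file content (is_hip_file content)

-- ===== LEMMAS AND PROOFS =====

-- prefixes survive dropping n ≤ length of the prefix
theorem prefix_drop_of_prefix {α : Type} (m s : List α) (n : Nat) (h : m <+: s) (hn : n ≤ m.length) :
    m.drop n <+: s.drop n := by
  obtain ⟨t, rfl⟩ := h
  exact ⟨t, (List.drop_append_of_le_length hn).symm⟩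

-- each anchored marker really carries 'hip' at its recorded offset (and fits)
theorem anchor_facts :
    anchoredMarkers.all (fun p => decide (p.2 + 3 ≤ p.1.toList.length) &&
      PySem.Chars.startswith (p.1.toList.drop p.2) ['h', 'i', 'p']) = true := by decide

-- the scan is true iff some position ≥ i carries 'hip' and passes the anchor test
theorem scanHip_iff (cl : List Char) (i : Nat) :
    scanHip cl i = true ↔
      ∃ j, i ≤ j ∧ PySem.Chars.startswith (cl.drop j) ['h', 'i', 'p'] = true ∧ tryAnchors cl j = true := by
  induction i using scanHip.induct (cl := cl) with
  | case1 i hlen =>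
      rw [scanHip]
      simp only [if_pos hlen, Bool.false_eq_true, false_iff]
      rintro ⟨j, hij, hhip, -⟩
      rw [List.drop_eq_nil_of_le (le_trans hlen hij)] at hhip
      exact absurd ((PySem.Chars.startswith_iff _ _).mp hhip) (by simp)
  | case2 i hlen hhip htry =>
      rw [scanHip]
      simp only [if_neg hlen, if_pos hhip, if_pos htry, true_iff]
      exact ⟨i, le_refl i, hhip, htry⟩
  | case3 i hlen hhip htry ih =>
      rw [scanHip]
      simp only [if_neg hlen, if_pos hhip, if_neg htry, ih]
      constructor
      · rintro ⟨j, hij, h1, h2⟩; exact ⟨j, Nat.le_of_succ_le hij, h1, h2⟩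
      · rintro ⟨j, hij, h1, h2⟩
        rcases Nat.lt_or_ge i j with hlt | hge
        · exact ⟨j, hlt, h1, h2⟩
        · have hji : j = i := Nat.le_antisymm hge hij
          rw [hji] at h2; exact absurd h2 htry
  | case4 i hlen hhip ih =>
      rw [scanHip]
      simp only [if_neg hlen, if_neg hhip, ih]
      constructor
      · rintro ⟨j, hij, h1, h2⟩; exact ⟨j, Nat.le_of_succ_le hij, h1, h2⟩
      · rintro ⟨j, hij, h1, h2⟩
        rcases Nat.lt_or_ge i j with hlt | hge
        · exact ⟨j, hlt, h1, h2⟩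
        · rw [Nat.le_antisymm hge hij] at h1; exact absurd h1 (by simp [hhip])

-- the scan from 0 finds exactly the contents containing some anchored marker
theorem scanHip_zero_iff (cl : List Char) :
    scanHip cl 0 = true ↔ anchoredMarkers.any (fun p => PySem.Chars.isIn p.1.toList cl) = true := by
  rw [scanHip_iff]
  simp only [List.any_eq_true]
  constructor
  · rintro ⟨j, -, -, htry⟩
    simp only [tryAnchors, List.any_eq_true, Bool.and_eq_true, decide_eq_true_eq] at htry
    obtain ⟨p, hp, hoff, hsw⟩ := htry
    refine ⟨p, hp, ?_⟩
    exact (PySem.Chars.exists_prefix_drop_iff_isIn _ _).mp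
      ⟨j - p.2, (PySem.Chars.startswith_iff _ _).mp hsw⟩
  · rintro ⟨p, hp, hin⟩
    obtain ⟨j, hpre⟩ := (PySem.Chars.exists_prefix_drop_iff_isIn p.1.toList cl).mpr hin
    have hf := List.all_eq_true.mp anchor_facts p hp
    simp only [Bool.and_eq_true, decide_eq_true_eq] at hf
    obtain ⟨hfit, hhipm⟩ := hf
    -- 'hip' sits at position j + p.2 of cl
    have hdrop : p.1.toList.drop p.2 <+: cl.drop (j + p.2) := by
      rw [← List.drop_drop]
      exact prefix_drop_of_prefix _ _ _ hpre (by omega)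
    have hhip : PySem.Chars.startswith (cl.drop (j + p.2)) ['h', 'i', 'p'] = true := by
      exact (PySem.Chars.startswith_iff _ _).mpr
        (((PySem.Chars.startswith_iff _ _).mp hhipm).trans hdrop)
    refine ⟨j + p.2, Nat.zero_le _, hhip, ?_⟩
    simp only [tryAnchors, List.any_eq_true, Bool.and_eq_true, decide_eq_true_eq]
    exact ⟨p, hp, by omega, by
      rw [Nat.add_sub_cancel]
      exact (PySem.Chars.startswith_iff _ _).mpr hpre⟩

-- A lowers each marker at test time; B's anchored markers carry the lowered literals
theorem markers_lower_eq :
    hipMarkers.map (fun m => (PySem.Str.lower m).toList) = anchoredMarkers.map (fun p => p.1.toList) := by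
  decide

-- ===== VERDICT (by name: the statement is the Claim_ definition above) =====
theorem is_hip_file_spec : Claim_equal_is_hip_file := by
  intro content _
  unfold Spec_is_hip_file is_hip_file is_hip_file_alt
  have key := congrArg (fun L => L.any (fun l => PySem.Chars.isIn l (PySem.Str.lower content).toList))
    markers_lower_eq
  simp only [List.any_map, Function.comp_def] at key
  rw [Bool.eq_iff_iff, scanHip_zero_iff, ← key]
  simp [PySem.Str.isIn]
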